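-- pv_equiv track=rewrite | github.com/AlannaJW/assignment-5-predict-movie-profits-AlannaJW | src/logistic_models.py | make_y_binary
-- ===== SOURCE A (Python) =====
-- def make_y_binary(y_class_data : dict, y_train) :
--     """Converts y values to binary list for each class."""
--     for clas in y_class_data.keys():
--         new = []
--         for row in range(len(y_train)):
--             if y_train[row] == clas:
--                 new.append(1)
--             else:
--                 new.append(0)
--         y_class_data[clas] = new
--     return y_class_data
-- ===== SOURCE B (Python) =====
-- def make_y_binary(y_class_data : dict, y_train) :
--     """Converts y values to binary list for each class using an inverted index
--     of row positions, then scattering 1s into preallocated zero vectors."""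
--     n = len(y_train)
--     positions = {}
--     for i, v in enumerate(y_train):
--         positions.setdefault(v, []).append(i)
--     for clas in y_class_data:
--         col = [0] * n
--         for i in positions.get(clas, []):
--             col[i] = 1
--         y_class_data[clas] = col
--     return y_class_data
-- ===== Notes on version B (the rewrite author's own statement) =====
-- stated objective: alternative
-- what changed: B builds an inverted index (value -> list of row positions) in one grouping pass over enumerate(y_train), then for each class allocates a zero vector and scatters 1s at the indexed positions; A instead rescans y_train once per class comparing every element to that class.
import Mathlib
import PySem

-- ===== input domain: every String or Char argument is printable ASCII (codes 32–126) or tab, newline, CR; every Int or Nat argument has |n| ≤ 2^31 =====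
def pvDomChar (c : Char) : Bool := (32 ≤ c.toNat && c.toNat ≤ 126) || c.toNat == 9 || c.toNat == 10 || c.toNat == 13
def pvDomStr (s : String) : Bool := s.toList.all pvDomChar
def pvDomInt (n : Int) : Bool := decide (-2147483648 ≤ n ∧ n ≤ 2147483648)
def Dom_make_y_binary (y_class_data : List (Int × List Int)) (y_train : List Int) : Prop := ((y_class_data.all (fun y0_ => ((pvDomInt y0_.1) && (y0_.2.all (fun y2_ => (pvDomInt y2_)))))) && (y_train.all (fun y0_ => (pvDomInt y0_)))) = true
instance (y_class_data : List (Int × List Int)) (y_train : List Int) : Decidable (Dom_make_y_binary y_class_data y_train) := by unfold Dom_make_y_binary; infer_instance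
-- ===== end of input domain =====

-- B replaces A's per-class comparison scans by an inverted index of row positions plus a
-- scatter of 1s into zero vectors (objective: alternative; similar cost).  Both Pythons
-- mutate the input dict in place and return it; the equivalence is about the return value.

-- ===== PORT A =====
-- for clas in keys: new = []; for row in range(len(y_train)): append 1/0; dict[clas] = new
def make_y_binary (y_class_data : List (Int × List Int)) (y_train : List Int) : List (Int × List Int) :=
  let d := PySem.Dict.ofList y_class_data
  (d.keys.foldl (fun d' clas =>
      d'.insert clas
        ((PySem.List.pyRange 0 (y_train.length : Int) 1).foldl
          (fun new row => new ++ [if PySem.List.pyGetD y_train row 0 = clas then (1 : Int) else 0]) [])) d).items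

-- ===== PORT B =====
-- positions.setdefault(v, []).append(i)  is exactly  Dict.modify v [] (· ++ [i])
def make_y_binary_alt (y_class_data : List (Int × List Int)) (y_train : List Int) : List (Int × List Int) :=
  let n := y_train.length
  let positions := (PySem.List.enumerate y_train).foldl
      (fun d p => d.modify p.2 [] (· ++ [p.1])) PySem.Dict.empty
  let d := PySem.Dict.ofList y_class_data
  (d.keys.foldl (fun d' clas =>
      d'.insert clas
        ((positions.getD clas []).foldl (fun col i => col.set i.toNat 1) (List.replicate n 0))) d).items

-- ===== PRECONDITION & SPEC =====
def Spec_make_y_binary (y_class_data : List (Int × List Int)) (y_train : List Int) (out : List (Int × List Int)) : Prop := out = make_y_binary_alt y_class_data y_train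
instance (y_class_data : List (Int × List Int)) (y_train : List Int) (out : List (Int × List Int)) : Decidable (Spec_make_y_binary y_class_data y_train out) := by unfold Spec_make_y_binary; infer_instance

-- ===== CLAIM (what is proved, stated in full; the proofs are below) =====
def Claim_equal_make_y_binary : Prop := ∀ (y_class_data : List (Int × List Int)) (y_train : List Int), Dom_make_y_binary y_class_data y_train → Spec_make_y_binary y_class_data y_train (make_y_binary y_class_data y_train)

-- ===== LEMMAS AND PROOFS =====

-- A's inner loop over row indices is the indicator map over y_train
theorem pvInnerA (y_train : List Int) (clas : Int) :
    (PySem.List.pyRange 0 (y_train.length : Int) 1).foldl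
      (fun new row => new ++ [if PySem.List.pyGetD y_train row 0 = clas then (1 : Int) else 0]) []
    = y_train.map (fun v => if v = clas then (1 : Int) else 0) := by
  rw [PySem.List.foldl_pyRange_zero_pyGetD' y_train 0
        (fun new v => new ++ [if v = clas then (1 : Int) else 0]) []]
  rw [PySem.List.foldl_append_singleton_eq_map]
  simp

-- B's inverted index: the positions recorded for a class are the matching entries of enumerate
theorem pvIdx (xs : List Int) (clas : Int) :
    ((PySem.List.enumerate xs).foldl (fun d p => d.modify p.2 [] (· ++ [p.1]))
        PySem.Dict.empty).getD clas []
    = ((PySem.List.enumerate xs).filter (fun p => p.2 == clas)).map (·.1) := by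
  have h : (PySem.List.enumerate xs).foldl (fun d p => d.modify p.2 [] (· ++ [p.1]))
        (PySem.Dict.empty (κ := Int) (ν := List Int))
      = ((PySem.List.enumerate xs).map Prod.swap).foldl
          (fun d p => d.modify p.1 [] (· ++ [p.2])) PySem.Dict.empty := by
    rw [List.foldl_map]; rfl
  rw [h, PySem.Dict.getD_foldl_modify_append]
  simp [List.filter_map, List.map_map, Function.comp_def]

-- scatter of 1s: element j of the fold is 1 if j is among the (nonnegative) indices, else unchanged
theorem pvSetFoldGet (idxs : List Int) (hnn : ∀ i ∈ idxs, 0 ≤ i) (L : List Int) (j : Nat) :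
    (idxs.foldl (fun col i => col.set i.toNat 1) L)[j]?
    = if (j : Int) ∈ idxs ∧ j < L.length then some 1 else L[j]? := by
  induction idxs generalizing L with
  | nil => simp
  | cons i rest ih =>
      have hi : 0 ≤ i := hnn i (by simp)
      rw [List.foldl_cons, ih (fun x hx => hnn x (by simp [hx]))]
      simp only [List.length_set, List.mem_cons]
      by_cases hlen : j < L.length
      · by_cases hmem : (j : Int) ∈ rest
        · simp [hmem, hlen]
        · by_cases hji : (j : Int) = i
          · have hj' : i.toNat = j := by omega
            have hset : (L.set i.toNat 1)[j]? = some 1 := by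
              rw [hj']; simp [hlen]
            rw [if_neg (fun h => hmem h.1), if_pos ⟨Or.inl hji, hlen⟩, hset]
          · have hj' : i.toNat ≠ j := by omega
            rw [if_neg (fun h => hmem h.1), if_neg (by tauto), List.getElem?_set_ne hj']
      · have hle : L.length ≤ j := Nat.le_of_not_lt hlen
        simp [hlen]

-- the scattered column equals the indicator map
theorem pvColB (xs : List Int) (clas : Int) :
    ((((PySem.List.enumerate xs).filter (fun p => p.2 == clas)).map (·.1)).foldl
        (fun col i => col.set i.toNat 1) (List.replicate xs.length 0))
    = xs.map (fun v => if v = clas then (1 : Int) else 0) := by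
  have hnn : ∀ i ∈ ((PySem.List.enumerate xs).filter (fun p => p.2 == clas)).map (·.1), 0 ≤ i := by
    intro i hi
    simp only [List.mem_map, List.mem_filter] at hi
    obtain ⟨p, ⟨hp, _⟩, rfl⟩ := hi
    rw [PySem.List.mem_enumerate_iff] at hp
    obtain ⟨k, hk, rfl⟩ := hp
    simp
  have hmem : ∀ j : Nat, ((j : Int) ∈ ((PySem.List.enumerate xs).filter (fun p => p.2 == clas)).map (·.1))
      ↔ ∃ h : j < xs.length, xs[j] = clas := by
    intro j
    simp only [List.mem_map, List.mem_filter]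
    constructor
    · rintro ⟨p, ⟨hp, hc⟩, hfst⟩
      rw [PySem.List.mem_enumerate_iff] at hp
      obtain ⟨k, hk, rfl⟩ := hp
      simp only [beq_iff_eq] at hc
      have : j = k := by simpa using hfst.symm
      subst this
      exact ⟨hk, hc⟩
    · rintro ⟨hj, hc⟩
      refine ⟨((j : Int), xs[j]), ⟨?_, by simp [hc]⟩, rfl⟩
      rw [PySem.List.mem_enumerate_iff]
      exact ⟨j, hj, by simp⟩
  apply List.ext_getElem?
  intro j
  rw [pvSetFoldGet _ hnn]
  by_cases hj : j < xs.length
  · rcases Decidable.em ((j : Int) ∈ ((PySem.List.enumerate xs).filter (fun p => p.2 == clas)).map (·.1)) with hm | hm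
    · obtain ⟨_, hc⟩ := (hmem j).mp hm
      simp [hm, hj, hc]
    · have hc : ¬ xs[j] = clas := by
        intro h; exact hm ((hmem j).mpr ⟨hj, h⟩)
      simp [hm, hj, hc]
  · have : ¬ (j : Int) ∈ ((PySem.List.enumerate xs).filter (fun p => p.2 == clas)).map (·.1) := by
      intro h; exact hj ((hmem j).mp h).fst
    simp [this, hj]

-- ===== VERDICT (by name: the statement is the Claim_ definition above) =====
theorem make_y_binary_spec : Claim_equal_make_y_binary := by
  intro y_class_data y_train _
  show make_y_binary y_class_data y_train = make_y_binary_alt y_class_data y_train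
  simp only [make_y_binary, make_y_binary_alt]
  congr 2
  funext d' clas
  rw [pvInnerA, pvIdx, pvColB]
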